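-- pv_equiv track=rewrite | github.com/dimistsaousis/merkle-trees-layer2 | merkle_tree.py | get_merkle_path_of_node
-- ===== SOURCE A (Python) =====
-- def get_merkle_path_of_node(level, index):
--     """
--     Computes the Merkle path of a node in a Merkle tree.
--
--     When a leaf in a Merkle tree is updated, the change bubbles up the tree
--     affecting all ancestor nodes. These nodes form the Merkle path for the leaf.
--     The Merkle path of a node represents the nodes affected by a change to the node.
--
--     Given a node N(level, index), its parent is N(level-1, floor(index/2)).
--     For every node N(level, index), it has two children: N(level+1, index*2) and N(level+1, index*2+1).
--     Thus, to compute the Merkle path of a node, we recursively list out its ancestors.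
--
--     Parameters:
--     - level (int): The level of the node in the Merkle tree.
--     - index (int): The index of the node at the given level.
--
--     Returns:
--     list: A list of dictionaries containing the level and index of each node in the Merkle path excluding the root.
--     """
--     merkle_path = []
--     current_level = level
--     while current_level > 0:
--         merkle_path.append({"level": current_level, "index": index})
--         index //= 2
--         current_level -= 1
--     return merkle_path
-- ===== SOURCE B (Python) =====
-- def get_merkle_path_of_node(level, index):
--     # Alternative algorithm: instead of walking leaf-to-root with a mutated
--     # running index, reconstruct the ancestor indices ROOT-TO-LEAF: start from
--     # the node's ancestor above level 1 (index >> level) and shift in one bit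
--     # of `index` per descended level, then reverse into A's leaf-to-root order.
--     if level <= 0:
--         return []
--     cur = index >> level
--     path = [{"level": level - shift, "index": (cur := cur * 2 + ((index >> shift) & 1))}
--             for shift in range(level - 1, -1, -1)]
--     path.reverse()
--     return path
-- ===== Notes on version B (the rewrite author's own statement) =====
-- stated objective: alternative
-- what changed: A walks leaf-to-root mutating a running index with index //= 2; B reconstructs the ancestor indices in the opposite, root-to-leaf order, starting from index >> level and shifting one bit of index in per level, then reverses the list into A's order.
import Mathlib
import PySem

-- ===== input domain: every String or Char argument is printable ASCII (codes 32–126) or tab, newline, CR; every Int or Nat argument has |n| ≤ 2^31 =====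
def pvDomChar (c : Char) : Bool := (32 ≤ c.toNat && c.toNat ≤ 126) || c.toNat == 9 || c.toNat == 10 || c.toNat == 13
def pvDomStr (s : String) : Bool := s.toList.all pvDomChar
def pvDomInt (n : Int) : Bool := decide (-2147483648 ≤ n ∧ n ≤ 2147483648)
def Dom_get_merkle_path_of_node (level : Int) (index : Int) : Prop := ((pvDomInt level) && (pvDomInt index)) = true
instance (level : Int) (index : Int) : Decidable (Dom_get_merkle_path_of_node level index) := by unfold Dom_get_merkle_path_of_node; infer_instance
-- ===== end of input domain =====

-- B replaces A's leaf-to-root walk (mutating index //= 2) by a root-to-leaf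
-- reconstruction that shifts one bit of `index` in per level and then reverses
-- (objective: alternative traversal order, same cost).

-- ===== PORT A =====
-- the while loop: state (current_level, index, merkle_path)
def get_merkle_path_of_node_loop (current_level : Int) (index : Int)
    (merkle_path : List (List (String × Int))) : List (List (String × Int)) :=
  if current_level > 0 then
    get_merkle_path_of_node_loop (current_level - 1) (PySem.Int.floordiv index 2)
      (merkle_path ++ [[("level", current_level), ("index", index)]])
  else merkle_path
termination_by current_level.toNat
decreasing_by omega

def get_merkle_path_of_node (level : Int) (index : Int) : List (List (String × Int)) :=
  get_merkle_path_of_node_loop level index []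

-- ===== PORT B =====
-- for shift in reversed(range(level)): cur = cur * 2 + ((index >> shift) & 1); append
-- Python '>>' on a nonnegative shift is Lean's '>>> (shift.toNat)'; '& 1' is PySem.Int.band _ 1
def get_merkle_path_of_node_alt (level : Int) (index : Int) : List (List (String × Int)) :=
  if level ≤ 0 then []
  else
    let st := ((PySem.List.pyRange 0 level 1).reverse).foldl
      (fun (st : Int × List (List (String × Int))) shift =>
        let cur := st.1 * 2 + PySem.Int.band (index >>> (shift.toNat : Nat)) 1
        (cur, st.2 ++ [[("level", level - shift), ("index", cur)]]))
      (index >>> level.toNat, [])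
    st.2.reverse

-- ===== PRECONDITION & SPEC =====
def Spec_get_merkle_path_of_node (level : Int) (index : Int) (out : List (List (String × Int))) : Prop := out = get_merkle_path_of_node_alt level index
instance (level : Int) (index : Int) (out : List (List (String × Int))) : Decidable (Spec_get_merkle_path_of_node level index out) := by unfold Spec_get_merkle_path_of_node; infer_instance

-- ===== CLAIM (what is proved, stated in full; the proofs are below) =====
def Claim_equal_get_merkle_path_of_node : Prop := ∀ (level : Int) (index : Int), Dom_get_merkle_path_of_node level index → Spec_get_merkle_path_of_node level index (get_merkle_path_of_node level index)

-- ===== LEMMAS AND PROOFS =====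

-- shifting right by one is floor division by 2 (Python-exact, also on negatives)
theorem pv_shr_one (y : Int) : y >>> (1 : Nat) = y / 2 := by
  cases y with
  | ofNat m =>
      show Int.ofNat (m >>> 1) = _
      simp [Nat.shiftRight_eq_div_pow, Int.ofNat_eq_natCast]
  | negSucc m =>
      show Int.negSucc (m >>> 1) = _
      rw [Int.negSucc_eq, Int.negSucc_eq]
      simp [Nat.shiftRight_eq_div_pow]
      omega

-- un-shifting one step: 2 * (x >> (s+1)) + ((x >> s) & 1) = x >> s
theorem pv_unshift (x : Int) (s : Nat) :
    (x >>> (s + 1)) * 2 + PySem.Int.band (x >>> s) 1 = x >>> s := by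
  rw [Int.shiftRight_add x s 1, pv_shr_one, PySem.Int.band_one,
      PySem.Int.mod_eq_emod_of_pos (by norm_num)]
  omega

-- the accumulator of A's loop is a prefix of the result
theorem pv_loop_acc (cl idx : Int) (acc : List (List (String × Int))) :
    get_merkle_path_of_node_loop cl idx acc =
      acc ++ get_merkle_path_of_node_loop cl idx [] := by
  generalize hn : cl.toNat = n
  induction n generalizing cl idx acc with
  | zero =>
      have h : ¬ cl > 0 := by omega
      rw [get_merkle_path_of_node_loop, if_neg h,
          get_merkle_path_of_node_loop, if_neg h]
      simp
  | succ n ih =>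
      have hcl : cl > 0 := by omega
      conv_lhs => rw [get_merkle_path_of_node_loop, if_pos hcl]
      conv_rhs => rw [get_merkle_path_of_node_loop, if_pos hcl]
      rw [ih (cl-1) _ _ (by omega), ih (cl-1) _ ([] ++ _) (by omega)]
      simp

-- A's floordiv-by-2 walk equals shifting: entry k of A's result is (cl - k, idx >> k)
theorem pv_a_closed (n : Nat) : ∀ (cl idx : Int), cl.toNat = n →
    get_merkle_path_of_node_loop cl idx [] =
      (List.range n).map (fun (k : Nat) => [("level", cl - (k : Int)), ("index", idx >>> k)]) := by
  induction n with
  | zero =>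
      intro cl idx hn
      have h : ¬ cl > 0 := by omega
      rw [get_merkle_path_of_node_loop, if_neg h]
      simp
  | succ n ih =>
      intro cl idx hn
      have hcl : cl > 0 := by omega
      have hdiv : PySem.Int.floordiv idx 2 = idx >>> (1 : Nat) := by
        rw [pv_shr_one, PySem.Int.floordiv_eq_ediv_of_pos (by norm_num)]
      rw [get_merkle_path_of_node_loop, if_pos hcl, pv_loop_acc,
          ih (cl - 1) (PySem.Int.floordiv idx 2) (by omega),
          List.range_succ_eq_map]
      rw [List.nil_append, List.singleton_append]
      congr 1
      · norm_num
      · rw [List.map_map]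
        apply List.map_congr_left
        intro k _
        show _ = [("level", cl - ((k : Int) + 1)), ("index", idx >>> (k + 1))]
        rw [hdiv, show idx >>> (1:Nat) >>> k = idx >>> (k+1) by
              rw [← Int.shiftRight_add idx 1 k, Nat.add_comm]]
        congr 2
        omega

-- B's fold over shifts [n-1, …, 0], starting from cur = index >> n, produces
-- exactly the entries (level - s, index >> s) in that (root-to-leaf) order
theorem pv_b_fold (level index : Int) :
    ∀ (n : Nat) (acc : List (List (String × Int))),
    (((List.range n).reverse.map Int.ofNat).foldl
      (fun (st : Int × List (List (String × Int))) shift =>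
        let cur := st.1 * 2 + PySem.Int.band (index >>> (shift.toNat : Nat)) 1
        (cur, st.2 ++ [[("level", level - shift), ("index", cur)]]))
      (index >>> n, acc)).2 =
      acc ++ (List.range n).reverse.map
        (fun (s : Nat) => [("level", level - (s : Int)), ("index", index >>> s)]) := by
  intro n
  induction n generalizing level index with
  | zero => intro acc; simp
  | succ n ih =>
      intro acc
      rw [List.range_succ, List.reverse_append]
      simp only [List.reverse_singleton, List.singleton_append, List.map_cons,
        List.foldl_cons]
      have hcur : (index >>> (n + 1)) * 2 + PySem.Int.band (index >>> (Int.ofNat n).toNat) 1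
          = index >>> n := by
        simpa using pv_unshift index n
      rw [hcur, ih level index (acc ++ [[("level", level - Int.ofNat n), ("index", index >>> n)]])]
      simp [Int.ofNat_eq_natCast]

-- ===== VERDICT (by name: the statement is the Claim_ definition above) =====
theorem get_merkle_path_of_node_spec : Claim_equal_get_merkle_path_of_node := by
  intro level index _
  unfold Spec_get_merkle_path_of_node get_merkle_path_of_node get_merkle_path_of_node_alt
  by_cases h : level ≤ 0
  · rw [if_pos h, pv_a_closed level.toNat level index rfl]
    have : level.toNat = 0 := by omega
    rw [this]; simp
  · rw [if_neg h]
    have hrange : PySem.List.pyRange 0 level 1 = (List.range level.toNat).map Int.ofNat := by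
      rw [PySem.List.pyRange_one]
      simp [Int.ofNat_eq_natCast]
    rw [pv_a_closed level.toNat level index rfl]
    simp only [hrange, ← List.map_reverse]
    rw [pv_b_fold level index level.toNat []]
    rw [List.nil_append, List.map_reverse, List.reverse_reverse]
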